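-- pv_equiv track=rewrite | github.com/wired87/core | core/handler_inspector.py | _extract_imports_from_source
-- ===== SOURCE A (Python) =====
-- def _extract_imports_from_source(source: str) -> str:
--     """Extract all import statements from source (lines until first non-import)."""
--     imports = []
--     in_import_block = True
--     for line in source.split("\n"):
--         stripped = line.strip()
--         if not stripped or stripped.startswith("#"):
--             if imports:
--                 imports.append(line)
--             continue
--         if stripped.startswith("import ") or stripped.startswith("from "):
--             imports.append(line)
--             in_import_block = True
--         elif in_import_block and imports:
--             break
--     return "\n".join(imports) if imports else ""
-- ===== SOURCE B (Python) =====
-- def _extract_imports_from_source(source: str) -> str: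
--     """Locate the first import line, then slice up to the first non-import code line."""
--     lines = source.split("\n")
--
--     def is_import(line):
--         s = line.strip()
--         return s.startswith("import ") or s.startswith("from ")
--
--     def is_boundary(line):
--         s = line.strip()
--         return bool(s) and not s.startswith("#") and not is_import(line)
--
--     start = next((i for i, l in enumerate(lines) if is_import(l)), None)
--     if start is None:
--         return ""
--     end = next((j for j in range(start, len(lines)) if is_boundary(lines[j])), len(lines))
--     return "\n".join(lines[start:end])
-- ===== Notes on version B (the rewrite author's own statement) =====
-- stated objective: simpler
-- what changed: B computes the start index (first import/from line) and the end index (first following non-blank, non-comment, non-import line) and returns one slice joined, instead of A's single accumulating loop with a running flag and conditional appends.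
import Mathlib
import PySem

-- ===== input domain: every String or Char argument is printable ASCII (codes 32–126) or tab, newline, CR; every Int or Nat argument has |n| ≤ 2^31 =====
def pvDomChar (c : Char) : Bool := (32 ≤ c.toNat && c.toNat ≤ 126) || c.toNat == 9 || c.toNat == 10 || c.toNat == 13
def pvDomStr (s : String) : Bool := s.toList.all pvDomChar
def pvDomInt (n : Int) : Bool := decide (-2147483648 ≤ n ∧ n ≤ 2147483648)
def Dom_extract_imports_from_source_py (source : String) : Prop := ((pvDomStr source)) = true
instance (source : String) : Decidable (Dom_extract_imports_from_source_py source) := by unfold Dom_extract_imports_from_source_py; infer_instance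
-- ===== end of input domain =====

-- B computes the start/end line indices first and returns one joined slice, instead of
-- A's accumulating loop with a running flag (objective: simpler decomposition).

-- ===== PORT A =====
-- A's for-loop with early break, carried state (imports, in_import_block), step for step.
def pvALoop (lines : List String) (imports : List String) (in_import_block : Bool) :
    List String :=
  match lines with
  | [] => imports
  | line :: rest =>
    let stripped := PySem.Str.strip line
    if stripped == "" || PySem.Str.startswith stripped "#" then
      (if imports ≠ [] then pvALoop rest (imports ++ [line]) in_import_block
       else pvALoop rest imports in_import_block)
    else if PySem.Str.startswith stripped "import " || PySem.Str.startswith stripped "from " then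
      pvALoop rest (imports ++ [line]) true
    else if in_import_block && imports ≠ [] then
      imports   -- break
    else
      pvALoop rest imports in_import_block

def extract_imports_from_source_py (source : String) : String :=
  let imports := pvALoop ((PySem.Str.split? source "\n").getD []) [] true
  if imports ≠ [] then PySem.Str.join "\n" imports else ""

-- ===== PORT B =====
def pvIsImport (line : String) : Bool :=
  let s := PySem.Str.strip line
  PySem.Str.startswith s "import " || PySem.Str.startswith s "from "

def pvIsBoundary (line : String) : Bool :=
  let s := PySem.Str.strip line
  !(s == "") && !(PySem.Str.startswith s "#") && !(pvIsImport line)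

def extract_imports_from_source_py_alt (source : String) : String :=
  let lines := (PySem.Str.split? source "\n").getD []
  match List.findIdx? pvIsImport lines with
  | none => ""
  | some start =>
    let rest := List.drop start lines
    let stop := (List.findIdx? pvIsBoundary rest).getD rest.length
    PySem.Str.join "\n" (List.take stop rest)

-- ===== PRECONDITION & SPEC =====
def Spec_extract_imports_from_source_py (source : String) (out : String) : Prop := out = extract_imports_from_source_py_alt source
instance (source : String) (out : String) : Decidable (Spec_extract_imports_from_source_py source out) := by unfold Spec_extract_imports_from_source_py; infer_instance

-- ===== CLAIM (what is proved, stated in full; the proofs are below) =====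
def Claim_equal_extract_imports_from_source_py : Prop := ∀ (source : String), Dom_extract_imports_from_source_py source → Spec_extract_imports_from_source_py source (extract_imports_from_source_py source)

-- ===== LEMMAS AND PROOFS =====

-- index of the first boundary line (end of the import block), length if none
def pvStop (lines : List String) : Nat := (List.findIdx? pvIsBoundary lines).getD lines.length

lemma pvStop_cons_not (a : String) (l : List String) (h : pvIsBoundary a = false) :
    pvStop (a :: l) = pvStop l + 1 := by
  simp [pvStop, List.findIdx?_cons, h]

-- two nonempty prefixes of the same list share their head
lemma pvPrefix_head {c d : Char} {p q s : List Char}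
    (h1 : (c :: p) <+: s) (h2 : (d :: q) <+: s) : c = d := by
  obtain ⟨t1, e1⟩ := h1; obtain ⟨t2, e2⟩ := h2
  rw [← e1] at e2
  exact (by simpa using congrArg (List.head? ·) e2 : d = c).symm

-- an import line is neither blank nor a comment (its stripped text starts with 'i'/'f')
lemma pvImport_cond (line : String) (h : pvIsImport line = true) :
    (PySem.Str.strip line == "" || PySem.Str.startswith (PySem.Str.strip line) "#") = false := by
  have h' : (['i','m','p','o','r','t',' '] <+: PySem.Chars.strip line.toList)
      ∨ (['f','r','o','m',' '] <+: PySem.Chars.strip line.toList) := by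
    simp only [pvIsImport, Bool.or_eq_true, PySem.Str.startswith_eq,
      PySem.Chars.startswith_iff, PySem.Str.toList_strip] at h
    simpa using h
  rw [Bool.or_eq_false_iff]
  constructor
  · rw [beq_eq_false_iff_ne]
    intro he
    have he' : PySem.Chars.strip line.toList = [] := by
      have := congrArg String.toList he
      simpa using this
    rcases h' with h' | h' <;> rw [he'] at h' <;> simp at h'
  · by_contra hc
    rw [Bool.not_eq_false, PySem.Str.startswith_eq] at hc
    have h2 : ['#'] <+: PySem.Chars.strip line.toList := by
      have := (PySem.Chars.startswith_iff _ _).mp hc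
      simpa using this
    rcases h' with h' | h' <;> exact absurd (pvPrefix_head h' h2) (by decide)

lemma pvBoundary_false_of_blank (line : String)
    (h : (PySem.Str.strip line == "" || PySem.Str.startswith (PySem.Str.strip line) "#") = true) :
    pvIsBoundary line = false := by
  rcases Bool.or_eq_true_iff.mp h with h | h <;> simp only [pvIsBoundary, h] <;> simp

lemma pvBoundary_false_of_import (line : String) (h : pvIsImport line = true) :
    pvIsBoundary line = false := by
  simp only [pvIsBoundary, h]; simp

lemma pvImport_of_not_blank_not_boundary (line : String)
    (h1 : (PySem.Str.strip line == "" || PySem.Str.startswith (PySem.Str.strip line) "#") = false)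
    (hb : pvIsBoundary line = false) : pvIsImport line = true := by
  rcases Bool.or_eq_false_iff.mp h1 with ⟨ha, hb'⟩
  simp only [pvIsBoundary, ha, hb'] at hb
  simpa using hb

-- once imports is nonempty, A appends exactly the lines before the first boundary, then stops
lemma pvALoop_nonempty (lines : List String) (imports : List String) (h : imports ≠ []) :
    pvALoop lines imports true = imports ++ List.take (pvStop lines) lines := by
  induction lines generalizing imports with
  | nil => simp [pvALoop, pvStop]
  | cons line rest ih =>
    by_cases h1 : (PySem.Str.strip line == "" || PySem.Str.startswith (PySem.Str.strip line) "#") = true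
    · -- blank/comment line: appended (imports nonempty)
      simp only [pvALoop]
      rw [if_pos h1, if_pos (by simp [h]), ih _ (by simp),
        pvStop_cons_not _ _ (pvBoundary_false_of_blank line h1), List.take_succ_cons]
      simp
    · have h1' : (PySem.Str.strip line == "" || PySem.Str.startswith (PySem.Str.strip line) "#") = false := by
        simpa using h1
      by_cases h2 : pvIsImport line = true
      · -- import line: appended
        simp only [pvALoop]
        rw [if_neg h1, if_pos (by simpa [pvIsImport] using h2), ih _ (by simp),
          pvStop_cons_not _ _ (pvBoundary_false_of_import line h2), List.take_succ_cons]
        simp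
      · -- boundary line: break; stop = 0
        have hb : pvIsBoundary line = true := by
          by_contra hbc
          exact h2 (pvImport_of_not_blank_not_boundary line h1' (by simpa using hbc))
        simp only [pvALoop]
        rw [if_neg h1, if_neg (by simpa [pvIsImport] using h2), if_pos (by simp [h])]
        simp [pvStop, List.findIdx?_cons, hb]
    
-- a non-import line is skipped by A while imports is empty (flag unchanged)
lemma pvALoop_skip (line : String) (rest : List String) (b : Bool)
    (hi : pvIsImport line = false) :
    pvALoop (line :: rest) [] b = pvALoop rest [] b := by
  simp only [pvALoop]
  by_cases h1 : (PySem.Str.strip line == "" || PySem.Str.startswith (PySem.Str.strip line) "#") = true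
  · rw [if_pos h1]; simp
  · rw [if_neg h1, if_neg (by simpa [pvIsImport] using hi), if_neg (by simp)]

-- an import line with empty imports takes A's import branch
lemma pvALoop_import (line : String) (rest : List String) (b : Bool)
    (hi : pvIsImport line = true) :
    pvALoop (line :: rest) [] b = pvALoop rest [line] true := by
  have h1 := pvImport_cond line hi
  have hcond : (PySem.Str.strip line == "" || PySem.Str.startswith (PySem.Str.strip line) "#") ≠ true := by
    rw [h1]; exact Bool.false_ne_true
  simp only [pvALoop]
  rw [if_neg hcond, if_pos (by simpa [pvIsImport] using hi)]
  simp

-- the joined loop result equals B's slice, for any flag value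
lemma pvMain (lines : List String) (b : Bool) :
    (if pvALoop lines [] b ≠ [] then PySem.Str.join "\n" (pvALoop lines [] b) else "") =
      (match List.findIdx? pvIsImport lines with
       | none => ""
       | some start =>
         PySem.Str.join "\n" (List.take (pvStop (List.drop start lines)) (List.drop start lines))) := by
  induction lines generalizing b with
  | nil => simp [pvALoop]
  | cons line rest ih =>
    by_cases hi : pvIsImport line = true
    · -- first import found at index 0
      rw [pvALoop_import line rest b hi]
      rw [pvALoop_nonempty rest [line] (by simp)]
      rw [List.findIdx?_cons, if_pos hi]
      simp only [List.drop_zero]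
      rw [pvStop_cons_not _ _ (pvBoundary_false_of_import line hi), List.take_succ_cons]
      simp
    · have hi' : pvIsImport line = false := by simpa using hi
      rw [pvALoop_skip line rest b hi', ih b]
      rw [List.findIdx?_cons, if_neg (by simp [hi'])]
      cases hfind : List.findIdx? pvIsImport rest with
      | none => simp
      | some s => simp

-- ===== VERDICT (by name: the statement is the Claim_ definition above) =====
theorem extract_imports_from_source_py_spec : Claim_equal_extract_imports_from_source_py := by
  intro source _
  unfold Spec_extract_imports_from_source_py extract_imports_from_source_py extract_imports_from_source_py_alt
  have := pvMain ((PySem.Str.split? source "\n").getD []) true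
  simp only [pvStop] at this
  exact this
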